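-- pv_equiv track=rewrite | github.com/parkbum11/Algorithm | Programmers/방문길이.py | solution
-- ===== SOURCE A (Python) =====
-- def solution(dirs):
--     answer = 0
--     flag = [[''] * 11 for _ in range(11)]
--     info = {'U': ['D', [-1, 0]], 'D': ['U', [1, 0]], 'R': ['L', [0, 1]], 'L': ['R', [0, -1]]} # U D R L
--     location = [5, 5]
--     for dir in dirs:
--         if location[0] + info[dir][1][0] < 0 or location[1] + info[dir][1][1] < 0 or location[0] + info[dir][1][0] >= 11 or location[1] + info[dir][1][1] >= 11: continue
--         if dir not in flag[location[0]][location[1]]: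
--             answer += 1
--             flag[location[0]][location[1]] += dir
--             flag[location[0] + info[dir][1][0]][location[1] + info[dir][1][1]] += info[dir][0]
--         location[0] += info[dir][1][0]
--         location[1] += info[dir][1][1]
--     return answer
-- ===== SOURCE B (Python) =====
-- def solution(dirs):
--     # Stage 1: build the sequence of visited positions (a move out of the
--     # 11x11 board is skipped and does not change the position).
--     moves = {'U': (-1, 0), 'D': (1, 0), 'R': (0, 1), 'L': (0, -1)}
--     path = [(5, 5)]
--     for d in dirs:
--         dr, dc = moves[d]
--         r, c = path[-1]
--         if 0 <= r + dr < 11 and 0 <= c + dc < 11: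
--             path.append((r + dr, c + dc))
--     # Stage 2: the traversed steps are the consecutive pairs of the path.
--     steps = list(zip(path, path[1:]))
--     # Stage 3: enumerate every unit edge of the 11x11 grid and count the
--     # ones the walk traversed (in either direction).
--     candidates = [((r, c), (r, c + 1)) for r in range(11) for c in range(10)] \
--                + [((r, c), (r + 1, c)) for r in range(10) for c in range(11)]
--     count = 0
--     for e in candidates:
--         if e in steps or (e[1], e[0]) in steps:
--             count += 1
--     return count
-- ===== Notes on version B (the rewrite author's own statement) =====
-- stated objective: alternative
-- what changed: B splits the work into stages: it first records the sequence of visited positions (no marking or counting during the walk), derives the traversed steps as consecutive path pairs, and then counts by enumerating all 220 unit edges of the 11x11 grid and testing each against the step list, instead of A's single pass over an 11x11 grid of per-cell direction-mark strings with an incremental membership-check-and-mark counter.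
import Mathlib
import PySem

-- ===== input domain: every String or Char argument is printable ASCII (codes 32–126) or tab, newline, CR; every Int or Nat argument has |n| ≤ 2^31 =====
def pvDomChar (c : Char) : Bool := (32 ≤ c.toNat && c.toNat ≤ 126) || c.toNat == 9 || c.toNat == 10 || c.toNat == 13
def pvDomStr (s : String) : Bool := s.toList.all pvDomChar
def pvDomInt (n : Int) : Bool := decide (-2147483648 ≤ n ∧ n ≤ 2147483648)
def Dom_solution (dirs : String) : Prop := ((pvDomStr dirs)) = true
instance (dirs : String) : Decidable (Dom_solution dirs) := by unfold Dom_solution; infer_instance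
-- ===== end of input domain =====

-- B is a staged re-implementation (objective: alternative): it records the walked path, then
-- counts traversed edges by enumerating every unit edge of the 11×11 grid and testing it against
-- the path's consecutive steps, instead of A's single pass marking directions on a grid of cells.

-- ===== PORT A =====
-- A's 11×11 list-of-lists `flag` is modeled as a function on the two indices; this is exact
-- because every access A makes is at indices inside [0,11) (start (5,5), moves only after the
-- bounds check), where Python list indexing is plain in-range indexing.
def infoOpp (d : Char) : Char :=
  if d = 'U' then 'D' else if d = 'D' then 'U' else if d = 'R' then 'L' else 'R'

def infoMove (d : Char) : Int × Int :=
  if d = 'U' then (-1, 0) else if d = 'D' then (1, 0) else if d = 'R' then (0, 1) else (0, -1)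

-- `flag[a][b] += ch` (append one char to one cell of the grid)
def markA (f : Int → Int → List Char) (a b : Int) (ch : Char) : Int → Int → List Char :=
  fun x y => if x = a ∧ y = b then f x y ++ [ch] else f x y

def stepA (s : Int × (Int → Int → List Char) × Int × Int) (d : Char) :
    Int × (Int → Int → List Char) × Int × Int :=
  let (answer, flag, l0, l1) := s
  let dr := (infoMove d).1
  let dc := (infoMove d).2
  if l0 + dr < 0 ∨ l1 + dc < 0 ∨ 11 ≤ l0 + dr ∨ 11 ≤ l1 + dc then s
  else if d ∉ flag l0 l1 then
    (answer + 1, markA (markA flag l0 l1 d) (l0 + dr) (l1 + dc) (infoOpp d), l0 + dr, l1 + dc)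
  else (answer, flag, l0 + dr, l1 + dc)

def solution (dirs : String) : Int :=
  (dirs.toList.foldl stepA (0, fun _ _ => [], 5, 5)).1

-- ===== PORT B =====
def deltaB (d : Char) : Int × Int :=
  match d with
  | 'U' => (-1, 0)
  | 'D' => (1, 0)
  | 'R' => (0, 1)
  | _ => (0, -1)

-- Stage 1 of Source B: one step of building the path ('r, c = path[-1]; … path.append(…)')
def stepP (path : List (Int × Int)) (d : Char) : List (Int × Int) :=
  match PySem.List.pyGet? path (-1) with
  | none => path   -- unreachable: the path starts at [(5,5)] and only grows
  | some (r, c) =>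
      let nr := r + (deltaB d).1
      let nc := c + (deltaB d).2
      if 0 ≤ nr ∧ nr < 11 ∧ 0 ≤ nc ∧ nc < 11 then path ++ [(nr, nc)] else path

-- Stage 3 of Source B: the two list comprehensions enumerating all unit edges of the grid
def candidatesB : List ((Int × Int) × (Int × Int)) :=
  ((PySem.List.pyRange 0 11 1).flatMap fun r =>
      (PySem.List.pyRange 0 10 1).map fun c => ((r, c), (r, c + 1)))
    ++ ((PySem.List.pyRange 0 10 1).flatMap fun r =>
      (PySem.List.pyRange 0 11 1).map fun c => ((r, c), (r + 1, c)))

def solution_alt (dirs : String) : Int :=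
  let path := dirs.toList.foldl stepP [(5, 5)]
  let steps := path.zip path.tail
  candidatesB.foldl
    (fun count e => if e ∈ steps ∨ (e.2, e.1) ∈ steps then count + 1 else count) 0

-- ===== PRECONDITION & SPEC =====
-- A raises KeyError on any character other than the four direction letters U, D, R, L (dict lookup info[dir]); Pre_ excludes those inputs.
def Pre_solution (dirs : String) : Prop :=
  dirs.toList.all (fun d => d == 'U' || d == 'D' || d == 'R' || d == 'L') = true
instance (dirs : String) : Decidable (Pre_solution dirs) := by unfold Pre_solution; infer_instance
def pvWitness_solution : String := "UD"

def Spec_solution (dirs : String) (out : Int) : Prop := out = solution_alt dirs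
instance (dirs : String) (out : Int) : Decidable (Spec_solution dirs out) := by unfold Spec_solution; infer_instance

-- ===== CLAIM (what is proved, stated in full; the proofs are below) =====
def Claim_equal_solution : Prop := ∀ (dirs : String), Dom_solution dirs → Pre_solution dirs → Spec_solution dirs (solution dirs)

-- ===== LEMMAS AND PROOFS =====

def isDir (d : Char) : Prop := d = 'U' ∨ d = 'D' ∨ d = 'R' ∨ d = 'L'

-- proof-side intermediate: the walk maintaining the set of canonical edges incrementally;
-- it bridges A's grid of marks (loop_sim) and B's path-then-count stages (path_sim).
def pmin (p q : Int × Int) : Int × Int :=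
  if p.1 < q.1 ∨ (p.1 = q.1 ∧ p.2 ≤ q.2) then p else q
def pmax (p q : Int × Int) : Int × Int :=
  if p.1 < q.1 ∨ (p.1 = q.1 ∧ p.2 ≤ q.2) then q else p

def stepB (s : PySem.Set ((Int × Int) × (Int × Int)) × Int × Int) (d : Char) :
    PySem.Set ((Int × Int) × (Int × Int)) × Int × Int :=
  let (v, r, c) := s
  let nr := r + (deltaB d).1
  let nc := c + (deltaB d).2
  if 0 ≤ nr ∧ nr < 11 ∧ 0 ≤ nc ∧ nc < 11 then
    (PySem.Set.add v (pmin (r, c) (nr, nc), pmax (r, c) (nr, nc)), nr, nc)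
  else s

-- the canonical (lexicographically sorted) unit edge leaving (r,c) in direction d
def edgeOf (d : Char) (r c : Int) : (Int × Int) × (Int × Int) :=
  if d = 'U' then ((r - 1, c), (r, c))
  else if d = 'D' then ((r, c), (r + 1, c))
  else if d = 'R' then ((r, c), (r, c + 1))
  else ((r, c - 1), (r, c))

lemma pminmax_edge (d : Char) (hd : isDir d) (r c : Int) :
    (pmin (r, c) (r + (infoMove d).1, c + (infoMove d).2),
     pmax (r, c) (r + (infoMove d).1, c + (infoMove d).2)) = edgeOf d r c := by
  rcases hd with h | h | h | h <;> subst h <;>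
    simp only [infoMove, edgeOf, pmin, pmax] <;>
    split_ifs <;> simp_all [Prod.ext_iff] <;> omega

lemma mem_markA (f : Int → Int → List Char) (a b : Int) (ch d : Char) (r c : Int) :
    d ∈ markA f a b ch r c ↔ d ∈ f r c ∨ (r = a ∧ c = b ∧ d = ch) := by
  unfold markA
  split_ifs with h
  · simp [List.mem_append]; tauto
  · simp; tauto

-- the crucial geometric fact: the marks A writes are exactly the triples describing the new edge
lemma edge_eq_iff (d d' : Char) (hd : isDir d) (hd' : isDir d') (l0 l1 r c : Int) :
    edgeOf d' r c = edgeOf d l0 l1 ↔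
      ((r = l0 ∧ c = l1 ∧ d' = d) ∨
       (r = l0 + (infoMove d).1 ∧ c = l1 + (infoMove d).2 ∧ d' = infoOpp d)) := by
  rcases hd with h | h | h | h <;> rcases hd' with h' | h' | h' | h' <;> subst h <;> subst h' <;>
    simp [edgeOf, infoMove, infoOpp, Prod.ext_iff] <;> omega

-- the simulation invariant between A's grid and the incremental edge set
def SimInv (f : Int → Int → List Char) (v : PySem.Set ((Int × Int) × (Int × Int))) : Prop :=
  ∀ r c d, isDir d → (d ∈ f r c ↔ edgeOf d r c ∈ v)

lemma loop_sim (l : List Char) (hl : ∀ d ∈ l, isDir d)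
    (ans : Int) (f : Int → Int → List Char) (l0 l1 : Int)
    (v : PySem.Set ((Int × Int) × (Int × Int)))
    (hinv : SimInv f v) (hans : ans = (v.length : Int)) :
    (l.foldl stepA (ans, f, l0, l1)).1 = ((l.foldl stepB (v, l0, l1)).1.length : Int) := by
  induction l generalizing ans f l0 l1 v with
  | nil => simpa using hans
  | cons d t ih =>
    have hd : isDir d := hl d (by simp)
    have ht : ∀ x ∈ t, isDir x := fun x hx => hl x (by simp [hx])
    have hmv : deltaB d = infoMove d := by
      rcases hd with h | h | h | h <;> subst h <;> rfl
    simp only [List.foldl_cons]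
    by_cases hb : l0 + (infoMove d).1 < 0 ∨ l1 + (infoMove d).2 < 0 ∨
        11 ≤ l0 + (infoMove d).1 ∨ 11 ≤ l1 + (infoMove d).2
    · -- out of bounds: both skip
      have hA : stepA (ans, f, l0, l1) d = (ans, f, l0, l1) := by
        simp only [stepA]; rw [if_pos hb]
      have hB : stepB (v, l0, l1) d = (v, l0, l1) := by
        simp only [stepB, hmv]; rw [if_neg (by omega)]
      rw [hA, hB]; exact ih ht ans f l0 l1 v hinv hans
    · have hB : stepB (v, l0, l1) d =
          (PySem.Set.add v (edgeOf d l0 l1), l0 + (infoMove d).1, l1 + (infoMove d).2) := by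
        simp only [stepB, hmv]
        rw [if_pos (by omega), pminmax_edge d (by exact hd)]
      by_cases hm : d ∈ f l0 l1
      · -- edge already visited: A moves without counting, the add is a no-op
        have hv : edgeOf d l0 l1 ∈ v := (hinv l0 l1 d hd).1 hm
        have hA : stepA (ans, f, l0, l1) d = (ans, f, l0 + (infoMove d).1, l1 + (infoMove d).2) := by
          simp only [stepA]; rw [if_neg hb, if_neg (by simpa using hm)]
        rw [hA, hB, PySem.Set.add_of_mem hv]
        exact ih ht ans f _ _ v hinv hans
      · -- new edge: A counts and marks both endpoints, the set gains the canonical edge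
        have hv : edgeOf d l0 l1 ∉ v := fun hv => hm ((hinv l0 l1 d hd).2 hv)
        have hA : stepA (ans, f, l0, l1) d =
            (ans + 1, markA (markA f l0 l1 d) (l0 + (infoMove d).1) (l1 + (infoMove d).2) (infoOpp d),
             l0 + (infoMove d).1, l1 + (infoMove d).2) := by
          simp only [stepA]; rw [if_neg hb, if_pos (by simpa using hm)]
        rw [hA, hB, PySem.Set.add_of_not_mem hv]
        have hinv' : SimInv
            (markA (markA f l0 l1 d) (l0 + (infoMove d).1) (l1 + (infoMove d).2) (infoOpp d))
            (v ++ [edgeOf d l0 l1]) := by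
          intro r c d' hd'
          rw [mem_markA, mem_markA, hinv r c d' hd', List.mem_append]
          simp only [List.mem_singleton]
          constructor
          · rintro ((h | h) | h)
            · exact Or.inl h
            · exact Or.inr ((edge_eq_iff d d' hd hd' l0 l1 r c).2 (Or.inl h))
            · exact Or.inr ((edge_eq_iff d d' hd hd' l0 l1 r c).2 (Or.inr h))
          · rintro (h | h)
            · exact Or.inl (Or.inl h)
            · rcases (edge_eq_iff d d' hd hd' l0 l1 r c).1 h with h | h
              · exact Or.inl (Or.inr h)
              · exact Or.inr h
        have hans' : ans + 1 = (((v ++ [edgeOf d l0 l1]).length : Nat) : Int) := by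
          rw [hans]; simp
        exact ih ht (ans + 1) _ _ _ _ hinv' hans'

-- the canonical edges of a path (image of its consecutive steps)
def EP (p : List (Int × Int)) : List ((Int × Int) × (Int × Int)) :=
  (p.zip p.tail).map (fun s => (pmin s.1 s.2, pmax s.1 s.2))

lemma zip_tail_append {α : Type} (p : List α) (a x : α) (h : p.getLast? = some a) :
    (p ++ [x]).zip ((p ++ [x]).tail) = p.zip p.tail ++ [(a, x)] := by
  induction p with
  | nil => simp at h
  | cons y t ih =>
    cases t with
    | nil => simp_all
    | cons z t' =>
      have h' : (z :: t').getLast? = some a := by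
        rwa [List.getLast?_cons_cons] at h
      have := ih h'
      simp only [List.cons_append, List.zip_cons_cons, List.tail_cons] at this ⊢
      rw [this]

-- the incremental edge set is the edge set of the recorded path, and the positions agree
lemma path_sim (l : List Char) (p : List (Int × Int)) (r c : Int)
    (h : p.getLast? = some (r, c)) :
    ∃ r' c', (l.foldl stepP p).getLast? = some (r', c') ∧
      l.foldl stepB (PySem.Set.ofList (EP p), r, c)
        = (PySem.Set.ofList (EP (l.foldl stepP p)), r', c') := by
  induction l generalizing p r c with
  | nil => exact ⟨r, c, h, rfl⟩
  | cons d t ih =>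
    simp only [List.foldl_cons]
    have hget : PySem.List.pyGet? p (-1) = some (r, c) := by
      rw [PySem.List.pyGet?_neg_one, h]
    by_cases hb : 0 ≤ r + (deltaB d).1 ∧ r + (deltaB d).1 < 11 ∧
        0 ≤ c + (deltaB d).2 ∧ c + (deltaB d).2 < 11
    · have hP : stepP p d = p ++ [(r + (deltaB d).1, c + (deltaB d).2)] := by
        simp only [stepP, hget]; rw [if_pos hb]
      have hB : stepB (PySem.Set.ofList (EP p), r, c) d =
          (PySem.Set.add (PySem.Set.ofList (EP p))
            (pmin (r, c) (r + (deltaB d).1, c + (deltaB d).2),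
             pmax (r, c) (r + (deltaB d).1, c + (deltaB d).2)),
           r + (deltaB d).1, c + (deltaB d).2) := by
        simp only [stepB]; rw [if_pos hb]
      have hEP : EP (p ++ [(r + (deltaB d).1, c + (deltaB d).2)]) =
          EP p ++ [(pmin (r, c) (r + (deltaB d).1, c + (deltaB d).2),
                    pmax (r, c) (r + (deltaB d).1, c + (deltaB d).2))] := by
        unfold EP
        rw [zip_tail_append p (r, c) _ h, List.map_append]
        rfl
      have hset : (PySem.Set.ofList (EP p)).add
          (pmin (r, c) (r + (deltaB d).1, c + (deltaB d).2),
           pmax (r, c) (r + (deltaB d).1, c + (deltaB d).2))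
          = PySem.Set.ofList (EP (p ++ [(r + (deltaB d).1, c + (deltaB d).2)])) := by
        rw [hEP, PySem.Set.ofList_append_singleton]
      rw [hP, hB, hset]
      exact ih (p ++ [(r + (deltaB d).1, c + (deltaB d).2)]) (r + (deltaB d).1)
        (c + (deltaB d).2) (by simp)
    · have hP : stepP p d = p := by
        simp only [stepP, hget]; rw [if_neg hb]
      have hB : stepB (PySem.Set.ofList (EP p), r, c) d = (PySem.Set.ofList (EP p), r, c) := by
        simp only [stepB]; rw [if_neg hb]
      rw [hP, hB]
      exact ih p r c h

-- invariant of the recorded path: points in the grid, consecutive points one unit apart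
def GoodPath (p : List (Int × Int)) : Prop :=
  (∀ q ∈ p, 0 ≤ q.1 ∧ q.1 < 11 ∧ 0 ≤ q.2 ∧ q.2 < 11) ∧
  (∀ s ∈ p.zip p.tail, (s.2.1 - s.1.1, s.2.2 - s.1.2) ∈
      ([(-1, 0), (1, 0), (0, 1), (0, -1)] : List (Int × Int)))

lemma goodPath_foldl (l : List Char) (p : List (Int × Int)) (r c : Int)
    (h : p.getLast? = some (r, c)) (hg : GoodPath p) :
    GoodPath (l.foldl stepP p) := by
  induction l generalizing p r c with
  | nil => exact hg
  | cons d t ih =>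
    simp only [List.foldl_cons]
    have hget : PySem.List.pyGet? p (-1) = some (r, c) := by
      rw [PySem.List.pyGet?_neg_one, h]
    by_cases hb : 0 ≤ r + (deltaB d).1 ∧ r + (deltaB d).1 < 11 ∧
        0 ≤ c + (deltaB d).2 ∧ c + (deltaB d).2 < 11
    · have hP : stepP p d = p ++ [(r + (deltaB d).1, c + (deltaB d).2)] := by
        simp only [stepP, hget]; rw [if_pos hb]
      rw [hP]
      refine ih (p ++ [(r + (deltaB d).1, c + (deltaB d).2)]) (r + (deltaB d).1)
        (c + (deltaB d).2) (by simp) ⟨?_, ?_⟩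
      · intro q hq
        rcases List.mem_append.1 hq with hq | hq
        · exact hg.1 q hq
        · simp only [List.mem_singleton] at hq; subst hq; exact ⟨hb.1, hb.2.1, hb.2.2.1, hb.2.2.2⟩
      · intro s hs
        rw [zip_tail_append p (r, c) _ h, List.mem_append] at hs
        rcases hs with hs | hs
        · exact hg.2 s hs
        · simp only [List.mem_singleton] at hs; subst hs
          have : deltaB d ∈ ([(-1, 0), (1, 0), (0, 1), (0, -1)] : List (Int × Int)) := by
            unfold deltaB; split <;> simp
          simpa using this
    · have hP : stepP p d = p := by
        simp only [stepP, hget]; rw [if_neg hb]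
      rw [hP]; exact ih p r c h hg

lemma mem_candidatesB (x : (Int × Int) × (Int × Int)) :
    x ∈ candidatesB ↔
      (∃ r c, 0 ≤ r ∧ r < 11 ∧ 0 ≤ c ∧ c < 10 ∧ x = ((r, c), (r, c + 1))) ∨
      (∃ r c, 0 ≤ r ∧ r < 10 ∧ 0 ≤ c ∧ c < 11 ∧ x = ((r, c), (r + 1, c))) := by
  simp only [candidatesB, List.mem_append, List.mem_flatMap, List.mem_map,
    PySem.List.mem_pyRange_one]
  constructor
  · rintro (⟨r, hr, c, hc, hx⟩ | ⟨r, hr, c, hc, hx⟩)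
    · exact Or.inl ⟨r, c, hr.1, hr.2, hc.1, hc.2, hx.symm⟩
    · exact Or.inr ⟨r, c, hr.1, hr.2, hc.1, hc.2, hx.symm⟩
  · rintro (⟨r, c, h1, h2, h3, h4, hx⟩ | ⟨r, c, h1, h2, h3, h4, hx⟩)
    · exact Or.inl ⟨r, ⟨h1, h2⟩, c, ⟨h3, h4⟩, hx.symm⟩
    · exact Or.inr ⟨r, ⟨h1, h2⟩, c, ⟨h3, h4⟩, hx.symm⟩

set_option maxRecDepth 100000 in
lemma nodup_candidatesB : candidatesB.Nodup := by decide

-- a step of a good path yields a canonical edge that is a grid candidate …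
lemma canon_mem_candidates (a1 a2 b1 b2 : Int)
    (ha : 0 ≤ a1 ∧ a1 < 11 ∧ 0 ≤ a2 ∧ a2 < 11)
    (hb : 0 ≤ b1 ∧ b1 < 11 ∧ 0 ≤ b2 ∧ b2 < 11)
    (hadj : (b1 - a1, b2 - a2) ∈ ([(-1, 0), (1, 0), (0, 1), (0, -1)] : List (Int × Int))) :
    (pmin (a1, a2) (b1, b2), pmax (a1, a2) (b1, b2)) ∈ candidatesB := by
  rw [mem_candidatesB]
  simp only [List.mem_cons, List.not_mem_nil, or_false, Prod.mk.injEq] at hadj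
  obtain ⟨ha1, ha2, ha3, ha4⟩ := ha
  obtain ⟨hb1, hb2, hb3, hb4⟩ := hb
  rcases hadj with ⟨h1, h2⟩ | ⟨h1, h2⟩ | ⟨h1, h2⟩ | ⟨h1, h2⟩
  · -- b = a + (-1,0): vertical edge (b, a)
    refine Or.inr ⟨b1, b2, by omega, by omega, by omega, by omega, ?_⟩
    simp only [pmin, pmax]; split_ifs with hc <;> simp only [Prod.mk.injEq, true_and, and_true] <;> omega
  · -- b = a + (1,0): vertical edge (a, b)
    refine Or.inr ⟨a1, a2, by omega, by omega, by omega, by omega, ?_⟩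
    simp only [pmin, pmax]; split_ifs with hc <;> simp only [Prod.mk.injEq, true_and, and_true] <;> omega
  · -- b = a + (0,1): horizontal edge (a, b)
    refine Or.inl ⟨a1, a2, by omega, by omega, by omega, by omega, ?_⟩
    simp only [pmin, pmax]; split_ifs with hc <;> simp only [Prod.mk.injEq, true_and] <;> omega
  · -- b = a + (0,-1): horizontal edge (b, a)
    refine Or.inl ⟨b1, b2, by omega, by omega, by omega, by omega, ?_⟩
    simp only [pmin, pmax]; split_ifs with hc <;> simp only [Prod.mk.injEq, true_and] <;> omega

-- … and the canonical pair is the step itself or its reversal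
lemma canon_cases (a b : Int × Int) :
    (pmin a b, pmax a b) = (a, b) ∨ (pmin a b, pmax a b) = (b, a) := by
  simp only [pmin, pmax]; split_ifs <;> simp

-- a candidate is already canonically ordered
lemma candidate_canon (x : (Int × Int) × (Int × Int)) (hx : x ∈ candidatesB) :
    pmin x.1 x.2 = x.1 ∧ pmax x.1 x.2 = x.2 ∧ pmin x.2 x.1 = x.1 ∧ pmax x.2 x.1 = x.2 := by
  rcases (mem_candidatesB x).1 hx with ⟨r, c, _, _, _, _, hx⟩ | ⟨r, c, _, _, _, _, hx⟩ <;>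
    subst hx <;> simp only [pmin, pmax] <;>
    refine ⟨if_pos ?_, if_pos ?_, if_neg ?_, if_neg ?_⟩ <;>
    first
      | exact Or.inl (by omega)
      | exact Or.inr ⟨trivial, by omega⟩
      | (rintro (h | ⟨h', h⟩) <;> omega)

-- the filtered candidates have exactly the members of the path's canonical edge list
lemma filter_mem_iff (p : List (Int × Int)) (hg : GoodPath p)
    (x : (Int × Int) × (Int × Int)) :
    (x ∈ candidatesB ∧ (x ∈ p.zip p.tail ∨ (x.2, x.1) ∈ p.zip p.tail)) ↔ x ∈ EP p := by
  constructor
  · rintro ⟨hc, hs | hs⟩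
    · have := (candidate_canon x hc).1
      have h2 := (candidate_canon x hc).2.1
      refine List.mem_map.2 ⟨x, hs, ?_⟩
      show (pmin x.1 x.2, pmax x.1 x.2) = x
      rw [this, h2]
    · have h3 := (candidate_canon x hc).2.2.1
      have h4 := (candidate_canon x hc).2.2.2
      refine List.mem_map.2 ⟨(x.2, x.1), hs, ?_⟩
      show (pmin x.2 x.1, pmax x.2 x.1) = x
      rw [h3, h4]
  · intro hx
    rcases List.mem_map.1 hx with ⟨s, hs, hxs⟩
    obtain ⟨⟨a1, a2⟩, b1, b2⟩ := s
    have ha : ((a1, a2) : Int × Int) ∈ p := (List.of_mem_zip hs).1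
    have hb : ((b1, b2) : Int × Int) ∈ p := List.mem_of_mem_tail (List.of_mem_zip hs).2
    have hcand : (pmin (a1, a2) (b1, b2), pmax (a1, a2) (b1, b2)) ∈ candidatesB :=
      canon_mem_candidates a1 a2 b1 b2 (hg.1 _ ha) (hg.1 _ hb) (hg.2 _ hs)
    subst hxs
    refine ⟨hcand, ?_⟩
    rcases canon_cases (a1, a2) (b1, b2) with h | h <;> simp only [Prod.mk.injEq] at h
    · exact Or.inl (by
        show (pmin (a1, a2) (b1, b2), pmax (a1, a2) (b1, b2)) ∈ p.zip p.tail
        rw [h.1, h.2]; exact hs)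
    · exact Or.inr (by
        show (pmax (a1, a2) (b1, b2), pmin (a1, a2) (b1, b2)) ∈ p.zip p.tail
        rw [h.1, h.2]; exact hs)

-- stage-3 count = size of the deduplicated canonical edge list
lemma count_eq_len (p : List (Int × Int)) (hg : GoodPath p) :
    candidatesB.foldl
        (fun count e => if e ∈ p.zip p.tail ∨ (e.2, e.1) ∈ p.zip p.tail then count + 1 else count)
        (0 : Int)
      = ((PySem.Set.ofList (EP p)).length : Int) := by
  rw [PySem.List.foldl_ite_add_one, zero_add]
  congr 1
  rw [List.countP_eq_length_filter]
  have hperm : (candidatesB.filter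
      (fun e => decide (e ∈ p.zip p.tail ∨ (e.2, e.1) ∈ p.zip p.tail))).Perm
      (PySem.Set.ofList (EP p)) := by
    rw [List.perm_ext_iff_of_nodup (List.Nodup.filter _ nodup_candidatesB)
      (PySem.Set.nodup_ofList _)]
    intro x
    rw [List.mem_filter, PySem.Set.mem_ofList, decide_eq_true_eq]
    exact filter_mem_iff p hg x
  exact hperm.length_eq

-- ===== VERDICT (by name: the statement is the Claim_ definition above) =====
theorem solution_spec : Claim_equal_solution := by
  intro dirs _ hpre
  unfold Spec_solution solution solution_alt
  have hpre' : ∀ d ∈ dirs.toList, isDir d := by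
    intro d hd
    have := List.all_eq_true.1 hpre d hd
    simp only [isDir]
    simp only [Bool.or_eq_true, beq_iff_eq] at this
    tauto
  have h1 : (dirs.toList.foldl stepA (0, fun _ _ => [], 5, 5)).1
      = (((dirs.toList.foldl stepB (PySem.Set.empty, 5, 5)).1.length : Nat) : Int) :=
    loop_sim dirs.toList hpre' 0 (fun _ _ => []) 5 5 PySem.Set.empty
      (by intro r c d _; simp [PySem.Set.empty]) rfl
  obtain ⟨r', c', _, h2⟩ := path_sim dirs.toList [(5, 5)] 5 5 (by simp)
  have hE : PySem.Set.ofList (EP [(5, 5)]) = PySem.Set.empty := rfl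
  rw [hE] at h2
  have hg : GoodPath (dirs.toList.foldl stepP [(5, 5)]) :=
    goodPath_foldl dirs.toList [(5, 5)] 5 5 (by simp)
      ⟨by intro q hq; simp at hq; subst hq; norm_num, by intro s hs; simp at hs⟩
  rw [h1, h2]
  exact (count_eq_len _ hg).symm
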